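-- pv_equiv track=rewrite | github.com/jacobianjl/binarysearch-solutions | detectvoterfraud.py | solve
-- ===== SOURCE A (Python) =====
-- def solve(votes):
--     a = []
--     for i in votes:
--         a.append(i[1])
--     if len(set(a)) < len(a):
--         return True
--     else:
--         return False
-- ===== SOURCE B (Python) =====
-- def solve(votes):
--     seen = set()
--     for i in votes:
--         x = i[1]
--         if x in seen:
--             return True
--         seen.add(x)
--     return False
-- ===== Notes on version B (the rewrite author's own statement) =====
-- stated objective: alternative
-- what changed: Replaces the build-full-list-then-compare set/list lengths shape with a single incremental pass that checks membership in a growing seen-set and returns True early on the first repeated second element.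
import Mathlib
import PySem

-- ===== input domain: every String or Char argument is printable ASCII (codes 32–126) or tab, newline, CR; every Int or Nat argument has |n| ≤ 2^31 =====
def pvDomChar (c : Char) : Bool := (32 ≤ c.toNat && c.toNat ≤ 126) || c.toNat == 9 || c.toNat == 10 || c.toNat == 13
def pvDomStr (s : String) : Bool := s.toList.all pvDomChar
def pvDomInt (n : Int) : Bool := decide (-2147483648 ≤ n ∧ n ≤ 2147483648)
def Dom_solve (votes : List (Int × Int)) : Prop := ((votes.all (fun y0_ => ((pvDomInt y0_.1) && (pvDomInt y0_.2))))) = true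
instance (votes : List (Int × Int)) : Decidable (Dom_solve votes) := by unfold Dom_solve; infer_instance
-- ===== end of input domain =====

-- B replaces A's build-the-whole-list-then-compare-lengths shape with a single
-- early-exit pass over a growing seen-set; same cost, different control flow.

-- ===== PORT A =====
def solve (votes : List (Int × Int)) : Bool :=
  let a := votes.foldl (fun acc i => acc ++ [i.2]) []
  if (PySem.Set.ofList a).length < a.length then true else false

-- ===== PORT B =====
def solveAltGo (seen : PySem.Set Int) : List (Int × Int) → Bool
  | [] => false
  | i :: rest =>
    let x := i.2
    if PySem.Set.contains seen x then true
    else solveAltGo (PySem.Set.add seen x) rest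

def solve_alt (votes : List (Int × Int)) : Bool :=
  solveAltGo PySem.Set.empty votes

-- ===== PRECONDITION & SPEC =====
def Spec_solve (votes : List (Int × Int)) (out : Bool) : Prop := out = solve_alt votes
instance (votes : List (Int × Int)) (out : Bool) : Decidable (Spec_solve votes out) := by unfold Spec_solve; infer_instance

-- ===== CLAIM (what is proved, stated in full; the proofs are below) =====
def Claim_equal_solve : Prop := ∀ (votes : List (Int × Int)), Dom_solve votes → Spec_solve votes (solve votes)

-- ===== LEMMAS AND PROOFS =====

theorem pv_foldl_append (votes : List (Int × Int)) (acc : List Int) :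
    votes.foldl (fun acc i => acc ++ [i.2]) acc = acc ++ votes.map Prod.snd := by
  induction votes generalizing acc with
  | nil => simp
  | cons v vs ih => simp [List.foldl, ih]

theorem pv_len_update_le (l : List Int) (s : PySem.Set Int) :
    (PySem.Set.update s l).length ≤ s.length + l.length := by
  induction l generalizing s with
  | nil => simp [PySem.Set.update_nil]
  | cons x xs ih =>
    rw [PySem.Set.update_cons]
    have h := ih (PySem.Set.add s x)
    have hl : (PySem.Set.add s x).length ≤ s.length + 1 := by
      rw [PySem.Set.add_eq_ite]; split <;> simp
    simp only [List.length_cons]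
    omega

theorem pv_go_spec (xs : List (Int × Int)) (seen : PySem.Set Int) :
    solveAltGo seen xs =
      decide ((PySem.Set.update seen (xs.map Prod.snd)).length < seen.length + xs.length) := by
  induction xs generalizing seen with
  | nil => simp [solveAltGo, PySem.Set.update_nil]
  | cons v vs ih =>
    simp only [solveAltGo, List.map, PySem.Set.update_cons]
    by_cases h : PySem.Set.contains seen v.2
    · have hm : v.2 ∈ seen := by simpa [PySem.Set.contains_iff] using h
      have hadd : PySem.Set.add seen v.2 = seen := PySem.Set.add_of_mem hm
      rw [if_pos h]
      simp only [hadd]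
      have hle := pv_len_update_le (vs.map Prod.snd) seen
      simp only [List.length_map] at hle
      exact (decide_eq_true (by simp only [List.length_cons]; omega)).symm
    · have hm : v.2 ∉ seen := by simp at h; exact h
      have hadd : PySem.Set.add seen v.2 = seen ++ [v.2] := PySem.Set.add_of_not_mem hm
      rw [if_neg h, ih (PySem.Set.add seen v.2)]
      have hlen : (PySem.Set.add seen v.2).length = seen.length + 1 := by
        rw [hadd]; simp
      rw [decide_eq_decide]
      simp only [hlen, List.length_cons]
      omega

-- ===== VERDICT (by name: the statement is the Claim_ definition above) =====
theorem solve_spec : Claim_equal_solve := by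
  intro votes _
  unfold Spec_solve solve solve_alt
  have h1 : votes.foldl (fun acc i => acc ++ [i.2]) [] = votes.map Prod.snd := by
    simpa using pv_foldl_append votes []
  have he : PySem.Set.update (PySem.Set.empty : PySem.Set Int) (votes.map Prod.snd)
      = PySem.Set.ofList (votes.map Prod.snd) := rfl
  simp only [h1, pv_go_spec, he]
  simp only [PySem.Set.empty, List.length_nil, Nat.zero_add, List.length_map]
  by_cases hlt : (PySem.Set.ofList (votes.map Prod.snd)).length < votes.length
  · simp [hlt]
  · simp [hlt]
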